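-- pv_equiv track=rewrite | github.com/martinmcd21/Scheduler-Proto | export_utils.py | filter_audit_entries
-- ===== SOURCE A (Python) =====
-- from typing import List, Dict, Any, Optional
--
-- AUDIT_ACTION_DESCRIPTIONS: Dict[str, str] = {
--     # Interview lifecycle
--     "graph_create_event": "Interview scheduled",
--     "graph_create_failed": "Failed to schedule interview",
--     "graph_create_group_event": "Group interview scheduled",
--     "graph_create_group_failed": "Failed to schedule group interview",
--     "graph_reschedule_event": "Interview rescheduled",
--     "graph_reschedule_failed": "Failed to reschedule interview",
--     "graph_cancel_event": "Interview cancelled",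
--     "interview_cancelled": "Interview cancelled",
--     "graph_cancel_failed": "Failed to cancel interview",
--     "interview_rescheduled": "Interview rescheduled",
--     "interview_reschedule_failed": "Failed to reschedule interview",
--     # Email actions
--     "email_sent": "Email sent",
--     "email_send_failed": "Failed to send email",
--     "candidate_notification_sent": "Candidate notified",
--     "cancellation_email_sent": "Cancellation notice sent",
--     "reschedule_email_sent": "Reschedule notice sent",
--     "graph_sent_scheduling_email": "Scheduling email sent",
--     "graph_send_failed": "Email send failed",
--     "graph_sent_ics": "Calendar invite sent",
--     # Parsing actions
--     "parse_slots_openai": "Parsed availability from upload",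
--     "parse_slots_text_openai": "Parsed availability from text",
--     # Status changes
--     "status_updated": "Status updated",
--     "interview_confirmed": "Interview confirmed",
--     # ICS actions
--     "ics_generated": "Calendar invite generated",
--     "ics_downloaded": "Calendar file downloaded",
--     # System actions
--     "graph_token_refresh": "Authentication refreshed",
--     "graph_token_ok": "Authentication successful",
--     "graph_token_failed": "Authentication failed",
--     "graph_calendar_read_ok": "Calendar read successful",
--     "graph_calendar_read_failed": "Calendar read failed",
--     "graph_dummy_event_ok": "Test event created",
--     "graph_dummy_event_failed": "Test event failed",
--     "db_migration": "Database updated",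
-- }
--
-- def filter_audit_entries(
--     entries: List[Dict[str, Any]],
--     action_filter: Optional[str] = None,
--     status_filter: Optional[str] = None,
--     search_term: Optional[str] = None,
-- ) -> List[Dict[str, Any]]:
--     """Filter audit entries based on criteria."""
--     filtered = entries
--
--     # Action filter (by human-readable name)
--     if action_filter and action_filter != "All":
--         # Find action codes that match this label
--         matching_codes = [
--             code for code, label in AUDIT_ACTION_DESCRIPTIONS.items()
--             if label == action_filter
--         ]
--         if matching_codes:
--             filtered = [e for e in filtered if e.get("action") in matching_codes]
--
--     # Status filter
--     if status_filter and status_filter != "All":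
--         status_lower = status_filter.lower()
--         filtered = [e for e in filtered if (e.get("status") or "").lower() == status_lower]
--
--     # Search filter
--     if search_term:
--         search_lower = search_term.lower()
--         filtered = [
--             e for e in filtered
--             if search_lower in (e.get("candidate_email") or "").lower()
--             or search_lower in (e.get("role_title") or "").lower()
--             or search_lower in (e.get("actor") or "").lower()
--         ]
--
--     return filtered
-- ===== SOURCE B (Python) =====
-- from typing import List, Dict, Any, Optional
--
-- AUDIT_ACTION_DESCRIPTIONS: Dict[str, str] = {
--     "graph_create_event": "Interview scheduled",
--     "graph_create_failed": "Failed to schedule interview",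
--     "graph_create_group_event": "Group interview scheduled",
--     "graph_create_group_failed": "Failed to schedule group interview",
--     "graph_reschedule_event": "Interview rescheduled",
--     "graph_reschedule_failed": "Failed to reschedule interview",
--     "graph_cancel_event": "Interview cancelled",
--     "interview_cancelled": "Interview cancelled",
--     "graph_cancel_failed": "Failed to cancel interview",
--     "interview_rescheduled": "Interview rescheduled",
--     "interview_reschedule_failed": "Failed to reschedule interview",
--     "email_sent": "Email sent",
--     "email_send_failed": "Failed to send email",
--     "candidate_notification_sent": "Candidate notified",
--     "cancellation_email_sent": "Cancellation notice sent",
--     "reschedule_email_sent": "Reschedule notice sent",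
--     "graph_sent_scheduling_email": "Scheduling email sent",
--     "graph_send_failed": "Email send failed",
--     "graph_sent_ics": "Calendar invite sent",
--     "parse_slots_openai": "Parsed availability from upload",
--     "parse_slots_text_openai": "Parsed availability from text",
--     "status_updated": "Status updated",
--     "interview_confirmed": "Interview confirmed",
--     "ics_generated": "Calendar invite generated",
--     "ics_downloaded": "Calendar file downloaded",
--     "graph_token_refresh": "Authentication refreshed",
--     "graph_token_ok": "Authentication successful",
--     "graph_token_failed": "Authentication failed",
--     "graph_calendar_read_ok": "Calendar read successful",
--     "graph_calendar_read_failed": "Calendar read failed",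
--     "graph_dummy_event_ok": "Test event created",
--     "graph_dummy_event_failed": "Test event failed",
--     "db_migration": "Database updated",
-- }
--
-- def filter_audit_entries(
--     entries: List[Dict[str, Any]],
--     action_filter: Optional[str] = None,
--     status_filter: Optional[str] = None,
--     search_term: Optional[str] = None,
-- ) -> List[Dict[str, Any]]:
--     """Filter audit entries in one pass with the criteria resolved up front."""
--     codes = None
--     if action_filter and action_filter != "All":
--         found = {c for c, label in AUDIT_ACTION_DESCRIPTIONS.items() if label == action_filter}
--         if found:
--             codes = found
--     status_lower = status_filter.lower() if status_filter and status_filter != "All" else None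
--     search_lower = search_term.lower() if search_term else None
--     return [
--         e for e in entries
--         if (codes is None or e.get("action") in codes)
--         and (status_lower is None or (e.get("status") or "").lower() == status_lower)
--         and (search_lower is None
--              or search_lower in (e.get("candidate_email") or "").lower()
--              or search_lower in (e.get("role_title") or "").lower()
--              or search_lower in (e.get("actor") or "").lower())
--     ]
-- ===== Notes on version B (the rewrite author's own statement) =====
-- stated objective: alternative
-- what changed: Resolves all filter criteria (action-code set, lowercased status, lowercased search term) once up front, then makes a single pass over the entries instead of A's three sequential filtered-list rebuilds.
import Mathlib
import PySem

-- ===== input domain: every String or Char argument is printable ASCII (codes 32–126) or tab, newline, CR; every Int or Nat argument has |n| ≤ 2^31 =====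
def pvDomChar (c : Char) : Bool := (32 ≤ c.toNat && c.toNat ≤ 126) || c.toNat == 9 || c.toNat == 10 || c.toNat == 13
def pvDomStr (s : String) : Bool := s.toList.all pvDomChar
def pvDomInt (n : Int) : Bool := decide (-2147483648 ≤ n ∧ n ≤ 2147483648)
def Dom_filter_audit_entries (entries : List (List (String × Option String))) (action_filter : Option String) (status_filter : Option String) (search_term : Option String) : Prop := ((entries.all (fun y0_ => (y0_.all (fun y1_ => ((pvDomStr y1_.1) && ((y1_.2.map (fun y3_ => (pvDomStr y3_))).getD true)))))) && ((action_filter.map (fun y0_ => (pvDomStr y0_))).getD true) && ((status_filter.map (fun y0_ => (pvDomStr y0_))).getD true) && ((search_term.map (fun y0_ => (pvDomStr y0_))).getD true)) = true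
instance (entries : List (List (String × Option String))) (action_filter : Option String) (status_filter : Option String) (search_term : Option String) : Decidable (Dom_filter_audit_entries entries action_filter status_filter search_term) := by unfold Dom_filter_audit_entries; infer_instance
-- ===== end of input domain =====

-- B resolves all filter criteria once up front and makes a single pass over the
-- entries instead of A's three sequential filtered-list rebuilds (alternative
-- decomposition, same asymptotic cost; return-value equivalence only).

-- module-level constant AUDIT_ACTION_DESCRIPTIONS (insertion order)
def AUDIT_ACTION_DESCRIPTIONS : List (String × String) :=
  [("graph_create_event", "Interview scheduled"),
   ("graph_create_failed", "Failed to schedule interview"),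
   ("graph_create_group_event", "Group interview scheduled"),
   ("graph_create_group_failed", "Failed to schedule group interview"),
   ("graph_reschedule_event", "Interview rescheduled"),
   ("graph_reschedule_failed", "Failed to reschedule interview"),
   ("graph_cancel_event", "Interview cancelled"),
   ("interview_cancelled", "Interview cancelled"),
   ("graph_cancel_failed", "Failed to cancel interview"),
   ("interview_rescheduled", "Interview rescheduled"),
   ("interview_reschedule_failed", "Failed to reschedule interview"),
   ("email_sent", "Email sent"),
   ("email_send_failed", "Failed to send email"),
   ("candidate_notification_sent", "Candidate notified"),
   ("cancellation_email_sent", "Cancellation notice sent"),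
   ("reschedule_email_sent", "Reschedule notice sent"),
   ("graph_sent_scheduling_email", "Scheduling email sent"),
   ("graph_send_failed", "Email send failed"),
   ("graph_sent_ics", "Calendar invite sent"),
   ("parse_slots_openai", "Parsed availability from upload"),
   ("parse_slots_text_openai", "Parsed availability from text"),
   ("status_updated", "Status updated"),
   ("interview_confirmed", "Interview confirmed"),
   ("ics_generated", "Calendar invite generated"),
   ("ics_downloaded", "Calendar file downloaded"),
   ("graph_token_refresh", "Authentication refreshed"),
   ("graph_token_ok", "Authentication successful"),
   ("graph_token_failed", "Authentication failed"),
   ("graph_calendar_read_ok", "Calendar read successful"),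
   ("graph_calendar_read_failed", "Calendar read failed"),
   ("graph_dummy_event_ok", "Test event created"),
   ("graph_dummy_event_failed", "Test event failed"),
   ("db_migration", "Database updated")]

-- e.get(k) on an entry dict (exact: first match, none = key absent)
def pvEntryGet (e : List (String × Option String)) (k : String) : Option (Option String) :=
  (PySem.Dict.mk e).get? k

-- ===== PORT A =====
def filter_audit_entries (entries : List (List (String × Option String))) (action_filter : Option String) (status_filter : Option String) (search_term : Option String) : List (List (String × Option String)) :=
  let filtered := entries
  let filtered :=
    match action_filter with
    | none => filtered
    | some a =>
      if a != "" && a != "All" then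
        let matching_codes := (AUDIT_ACTION_DESCRIPTIONS.filter (fun p => p.2 == a)).map (fun p => p.1)
        if matching_codes != [] then
          filtered.filter (fun e =>
            match pvEntryGet e "action" with
            | some (some v) => matching_codes.contains v
            | _ => false)
        else filtered
      else filtered
  let filtered :=
    match status_filter with
    | none => filtered
    | some s =>
      if s != "" && s != "All" then
        let status_lower := PySem.Str.lower s
        filtered.filter (fun e =>
          PySem.Str.lower (((pvEntryGet e "status").getD none).getD "") == status_lower)
      else filtered
  let filtered :=
    match search_term with
    | none => filtered
    | some t =>
      if t != "" then
        let search_lower := PySem.Str.lower t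
        filtered.filter (fun e =>
          PySem.Str.isIn search_lower (PySem.Str.lower (((pvEntryGet e "candidate_email").getD none).getD ""))
          || PySem.Str.isIn search_lower (PySem.Str.lower (((pvEntryGet e "role_title").getD none).getD ""))
          || PySem.Str.isIn search_lower (PySem.Str.lower (((pvEntryGet e "actor").getD none).getD "")))
      else filtered
  filtered

-- ===== PORT B =====
def filter_audit_entries_alt (entries : List (List (String × Option String))) (action_filter : Option String) (status_filter : Option String) (search_term : Option String) : List (List (String × Option String)) :=
  let codes : Option (PySem.Set String) :=
    match action_filter with
    | none => none
    | some a =>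
      if a != "" && a != "All" then
        let found : PySem.Set String :=
          PySem.Set.ofList ((AUDIT_ACTION_DESCRIPTIONS.filter (fun p => p.2 == a)).map (fun p => p.1))
        if found.isEmpty then none else some found
      else none
  let status_lower : Option String :=
    match status_filter with
    | none => none
    | some s => if s != "" && s != "All" then some (PySem.Str.lower s) else none
  let search_lower : Option String :=
    match search_term with
    | none => none
    | some t => if t != "" then some (PySem.Str.lower t) else none
  entries.filter (fun e =>
    (match codes with
     | none => true
     | some cs =>
       match (pvEntryGet e "action").getD none with
       | some v => PySem.Set.contains cs v
       | none => false)
    && (match status_lower with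
        | none => true
        | some sl => PySem.Str.lower (((pvEntryGet e "status").getD none).getD "") == sl)
    && (match search_lower with
        | none => true
        | some tl =>
          PySem.Str.isIn tl (PySem.Str.lower (((pvEntryGet e "candidate_email").getD none).getD ""))
          || PySem.Str.isIn tl (PySem.Str.lower (((pvEntryGet e "role_title").getD none).getD ""))
          || PySem.Str.isIn tl (PySem.Str.lower (((pvEntryGet e "actor").getD none).getD ""))))

-- ===== PRECONDITION & SPEC =====
def Spec_filter_audit_entries (entries : List (List (String × Option String))) (action_filter : Option String) (status_filter : Option String) (search_term : Option String) (out : List (List (String × Option String))) : Prop := out = filter_audit_entries_alt entries action_filter status_filter search_term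
instance (entries : List (List (String × Option String))) (action_filter : Option String) (status_filter : Option String) (search_term : Option String) (out : List (List (String × Option String))) : Decidable (Spec_filter_audit_entries entries action_filter status_filter search_term out) := by unfold Spec_filter_audit_entries; infer_instance

-- ===== CLAIM (what is proved, stated in full; the proofs are below) =====
def Claim_equal_filter_audit_entries : Prop := ∀ (entries : List (List (String × Option String))) (action_filter : Option String) (status_filter : Option String) (search_term : Option String), Dom_filter_audit_entries entries action_filter status_filter search_term → Spec_filter_audit_entries entries action_filter status_filter search_term (filter_audit_entries entries action_filter status_filter search_term)

-- ===== LEMMAS AND PROOFS =====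

-- proof helpers: optional-filter application, A's stage predicates, and stage normal forms
def pvApp {α : Type} (o : Option (α → Bool)) (l : List α) : List α :=
  match o with | none => l | some p => l.filter p

def pvOpt {α : Type} (o : Option (α → Bool)) (x : α) : Bool :=
  match o with | none => true | some p => p x

lemma pvApp_eq {α : Type} (o : Option (α → Bool)) (l : List α) : pvApp o l = l.filter (pvOpt o) := by
  cases o with
  | none => exact (List.filter_true l).symm
  | some p => rfl

lemma pvApp3 {α : Type} (l : List α) (o1 o2 o3 : Option (α → Bool)) :
    pvApp o3 (pvApp o2 (pvApp o1 l)) = l.filter (fun x => (pvOpt o1 x && pvOpt o2 x) && pvOpt o3 x) := by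
  rw [pvApp_eq, pvApp_eq, pvApp_eq, List.filter_filter, List.filter_filter]
  exact List.filter_congr (fun x _ => by cases pvOpt o1 x <;> cases pvOpt o2 x <;> cases pvOpt o3 x <;> rfl)

def pvC (a : String) : List String :=
  (AUDIT_ACTION_DESCRIPTIONS.filter (fun p => p.2 == a)).map (fun p => p.1)

def pvPA (codes : List String) (e : List (String × Option String)) : Bool :=
  match pvEntryGet e "action" with
  | some (some v) => codes.contains v
  | _ => false

def pvPS (s : String) (e : List (String × Option String)) : Bool :=
  PySem.Str.lower (((pvEntryGet e "status").getD none).getD "") == PySem.Str.lower s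

def pvPT (t : String) (e : List (String × Option String)) : Bool :=
  PySem.Str.isIn (PySem.Str.lower t) (PySem.Str.lower (((pvEntryGet e "candidate_email").getD none).getD ""))
  || PySem.Str.isIn (PySem.Str.lower t) (PySem.Str.lower (((pvEntryGet e "role_title").getD none).getD ""))
  || PySem.Str.isIn (PySem.Str.lower t) (PySem.Str.lower (((pvEntryGet e "actor").getD none).getD ""))

def pvO1 (af : Option String) : Option (List (String × Option String) → Bool) :=
  match af with
  | none => none
  | some a =>
    if a != "" && a != "All" then
      if pvC a != [] then some (pvPA (pvC a)) else none
    else none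

def pvO2 (sf : Option String) : Option (List (String × Option String) → Bool) :=
  match sf with
  | none => none
  | some s => if s != "" && s != "All" then some (pvPS s) else none

def pvO3 (st : Option String) : Option (List (String × Option String) → Bool) :=
  match st with
  | none => none
  | some t => if t != "" then some (pvPT t) else none

lemma pvOfListIsEmpty (codes : List String) :
    (PySem.Set.ofList codes).isEmpty = codes.isEmpty := by
  cases codes with
  | nil => rfl
  | cons x t =>
    have hx : x ∈ PySem.Set.ofList (x :: t) := by simp [PySem.Set.mem_ofList]
    simp [List.ne_nil_of_mem hx]

-- A is the three optional filter stages in sequence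
lemma pvStageA (entries : List (List (String × Option String))) (af sf st : Option String) :
    filter_audit_entries entries af sf st = pvApp (pvO3 st) (pvApp (pvO2 sf) (pvApp (pvO1 af) entries)) := by
  rcases af with _ | a <;> rcases sf with _ | s <;> rcases st with _ | t <;>
    simp only [filter_audit_entries, pvO1, pvO2, pvO3, pvC] <;>
    (try split_ifs) <;> (try rfl)

-- B is the single filter by the conjunction of the three optional criteria
set_option maxHeartbeats 3000000 in
lemma pvStageB (entries : List (List (String × Option String))) (af sf st : Option String) :
    filter_audit_entries_alt entries af sf st =
      entries.filter (fun e => (pvOpt (pvO1 af) e && pvOpt (pvO2 sf) e) && pvOpt (pvO3 st) e) := by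
  rcases af with _ | a <;> rcases sf with _ | s <;> rcases st with _ | t <;>
    simp only [filter_audit_entries_alt, pvO1, pvO2, pvO3, pvC, pvOfListIsEmpty] <;>
    (try split_ifs) <;> (try rfl) <;>
    (try (exfalso; simp only [bne_iff_ne, List.isEmpty_iff, not_not] at *; contradiction)) <;>
    refine List.filter_congr (fun e _ => ?_) <;>
    rcases h : pvEntryGet e "action" with _ | (_ | v) <;>
    simp [pvPA, pvPS, pvPT, pvOpt, h, PySem.Set.mem_ofList]

theorem filter_audit_entries_spec : Claim_equal_filter_audit_entries := by
  intro entries af sf st _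
  exact (pvStageA entries af sf st).trans
    ((pvApp3 entries (pvO1 af) (pvO2 sf) (pvO3 st)).trans (pvStageB entries af sf st).symm)
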